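-- pv_equiv track=rewrite | github.com/a-brandon/practice | edabit/complete_binary.py | complete_binary
-- ===== SOURCE A (Python) =====
-- def complete_binary(s):
--     if len(s) % 8 == 0:
--         return s
--     s = list(s)
--     while True:
--         s[:0] += '0'
--         if len(s) % 8 == 0:
--             break
--     return ''.join(s)
-- ===== SOURCE B (Python) =====
-- def complete_binary(s):
--     pad = (8 - len(s) % 8) % 8
--     return '0' * pad + s
-- ===== Notes on version B (the rewrite author's own statement) =====
-- stated objective: simpler
-- what changed: Replaces the while-loop that prepends one zero character per iteration with a closed-form computation of the pad length ((8 - len(s) % 8) % 8) and a single concatenation.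
import Mathlib
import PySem

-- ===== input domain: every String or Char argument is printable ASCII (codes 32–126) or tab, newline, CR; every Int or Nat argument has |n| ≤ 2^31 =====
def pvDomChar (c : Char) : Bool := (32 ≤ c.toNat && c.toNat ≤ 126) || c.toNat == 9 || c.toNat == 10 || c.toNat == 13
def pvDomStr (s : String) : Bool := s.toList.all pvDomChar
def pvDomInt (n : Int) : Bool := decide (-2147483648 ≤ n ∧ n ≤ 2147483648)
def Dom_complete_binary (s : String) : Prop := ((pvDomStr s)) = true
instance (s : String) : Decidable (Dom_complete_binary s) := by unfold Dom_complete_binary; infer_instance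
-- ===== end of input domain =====

-- B replaces A's prepend-one-zero-per-iteration loop with a closed-form pad-length computation and a single concatenation (simpler).


-- ===== PORT A =====
-- the while-loop: prepend '0', stop when length % 8 = 0; fuel 8 only makes the
-- same computation total (the loop runs at most 7 iterations)
def completeBinaryLoop : Nat → List Char → List Char
  | 0, l => l
  | fuel + 1, l =>
    let l' := '0' :: l
    if l'.length % 8 = 0 then l' else completeBinaryLoop fuel l'

def complete_binary (s : String) : String :=
  if s.toList.length % 8 = 0 then s
  else String.ofList (completeBinaryLoop 8 s.toList)

-- ===== PORT B =====
def complete_binary_alt (s : String) : String :=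
  String.ofList (List.replicate ((8 - s.toList.length % 8) % 8) '0' ++ s.toList)

-- ===== PRECONDITION & SPEC =====
def Spec_complete_binary (s : String) (out : String) : Prop := out = complete_binary_alt s
instance (s : String) (out : String) : Decidable (Spec_complete_binary s out) := by unfold Spec_complete_binary; infer_instance

-- ===== CLAIM (what is proved, stated in full; the proofs are below) =====
def Claim_equal_complete_binary : Prop := ∀ (s : String), Dom_complete_binary s → Spec_complete_binary s (complete_binary s)

-- ===== LEMMAS AND PROOFS =====
theorem completeBinaryLoop_eq (fuel : Nat) (l : List Char)
    (h0 : l.length % 8 ≠ 0) (hf : (8 - l.length % 8) % 8 ≤ fuel) :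
    completeBinaryLoop fuel l = List.replicate ((8 - l.length % 8) % 8) '0' ++ l := by
  induction fuel generalizing l with
  | zero => omega
  | succ n ih =>
    simp only [completeBinaryLoop]
    split
    · rename_i h
      simp only [List.length_cons] at h
      have : (8 - l.length % 8) % 8 = 1 := by omega
      simp [this]
    · rename_i h
      simp only [List.length_cons] at h
      rw [ih ('0' :: l) (by simpa using h) (by simp; omega)]
      have h1 : (8 - ('0' :: l).length % 8) % 8 + 1 = (8 - l.length % 8) % 8 := by
        simp only [List.length_cons]; omega
      rw [← h1, List.replicate_succ']
      simp

theorem complete_binary_spec : Claim_equal_complete_binary := by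
  intro s _
  unfold Spec_complete_binary complete_binary complete_binary_alt
  split
  · rename_i h
    have h0 : (8 - s.toList.length % 8) % 8 = 0 := by omega
    rw [h0, List.replicate_zero, List.nil_append]
    exact String.ofList_toList.symm
  · rename_i h
    rw [completeBinaryLoop_eq 8 s.toList h (by omega)]
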